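-- pv_equiv track=rewrite | github.com/ZethAlvarez01/Digi_project | qr_to_html.py | get_ring_delta
-- ===== SOURCE A (Python) =====
-- EGG_N     = 12
--
-- def get_ring_delta(f1: int, f2: int) -> list[tuple[int, int]]:
--     """Celdas en egg-coords que están en f2 pero NO en f1 (centrado en 12×12)."""
--     f1_off = (EGG_N - f1) // 2          # puede ser negativo si f2>EGG_N
--     f2_off = (EGG_N - f2) // 2
--     f1_cells = {
--         (r, c)
--         for r in range(f1_off, f1_off + f1)
--         for c in range(f1_off, f1_off + f1)
--     }
--     return [
--         (r, c)
--         for r in range(f2_off, f2_off + f2)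
--         for c in range(f2_off, f2_off + f2)
--         if (r, c) not in f1_cells
--     ]
-- ===== SOURCE B (Python) =====
-- EGG_N = 12
--
-- def get_ring_delta(f1: int, f2: int) -> list[tuple[int, int]]:
--     """Cells of the centered f2 square not in the centered f1 square, decided
--     by a bounds inequality instead of precomputing the f1 cell set."""
--     lo = (EGG_N - f1) // 2
--     hi = lo + f1
--     f2_off = (EGG_N - f2) // 2
--     end = f2_off + f2
--     return [
--         (r, c)
--         for r in range(f2_off, end)
--         for c in range(f2_off, end)
--         if r < lo or hi <= r or c < lo or hi <= c
--     ]
-- ===== Notes on version B (the rewrite author's own statement) =====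
-- stated objective: faster
-- what changed: B drops A's precomputed f1_cells set entirely and decides f1-square membership by a centered-square bounds inequality inside the f2 double comprehension, so the O(f1^2) set-building pass disappears.
import Mathlib
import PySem

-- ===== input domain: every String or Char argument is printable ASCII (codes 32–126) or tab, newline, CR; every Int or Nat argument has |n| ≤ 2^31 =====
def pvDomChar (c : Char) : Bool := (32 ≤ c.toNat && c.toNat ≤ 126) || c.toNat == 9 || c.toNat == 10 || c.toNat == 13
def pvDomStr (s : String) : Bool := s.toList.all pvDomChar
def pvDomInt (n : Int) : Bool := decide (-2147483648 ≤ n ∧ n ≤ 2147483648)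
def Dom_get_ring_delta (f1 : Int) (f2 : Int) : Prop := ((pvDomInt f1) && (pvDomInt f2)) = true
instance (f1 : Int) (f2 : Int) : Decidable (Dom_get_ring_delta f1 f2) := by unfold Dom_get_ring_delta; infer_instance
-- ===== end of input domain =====

-- B drops A's precomputed f1-cell set and decides f1-square membership by a bounds inequality (no O(f1^2) pass).

-- ===== PORT A =====
-- A's set comprehension generates pairwise-DISTINCT pairs (r, c), so set(...) is exactly the generated
-- list in generation order (proved in square_set_exact below); porting it as that list keeps the value
-- exact while #eval stays linear in the number of generated cells.
def get_ring_delta (f1 : Int) (f2 : Int) : List (Int × Int) :=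
  let f1_off := PySem.Int.floordiv (12 - f1) 2
  let f2_off := PySem.Int.floordiv (12 - f2) 2
  let f1_cells : PySem.Set (Int × Int) :=
    (PySem.List.pyRange f1_off (f1_off + f1) 1).flatMap (fun r =>
      (PySem.List.pyRange f1_off (f1_off + f1) 1).map (fun c => (r, c)))
  (PySem.List.pyRange f2_off (f2_off + f2) 1).flatMap (fun r =>
    ((PySem.List.pyRange f2_off (f2_off + f2) 1).filter
      (fun c => !(PySem.Set.contains f1_cells (r, c)))).map (fun c => (r, c)))

-- ===== PORT B =====
def get_ring_delta_alt (f1 : Int) (f2 : Int) : List (Int × Int) :=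
  let lo := PySem.Int.floordiv (12 - f1) 2
  let hi := lo + f1
  let f2_off := PySem.Int.floordiv (12 - f2) 2
  let stop := f2_off + f2
  (PySem.List.pyRange f2_off stop 1).flatMap (fun r =>
    ((PySem.List.pyRange f2_off stop 1).filter
      (fun c => decide (r < lo) || decide (hi ≤ r) || decide (c < lo) || decide (hi ≤ c))).map
      (fun c => (r, c)))

-- ===== PRECONDITION & SPEC =====
def Spec_get_ring_delta (f1 : Int) (f2 : Int) (out : List (Int × Int)) : Prop := out = get_ring_delta_alt f1 f2
instance (f1 : Int) (f2 : Int) (out : List (Int × Int)) : Decidable (Spec_get_ring_delta f1 f2 out) := by unfold Spec_get_ring_delta; infer_instance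

-- ===== CLAIM (what is proved, stated in full; the proofs are below) =====
def Claim_equal_get_ring_delta : Prop := ∀ (f1 : Int) (f2 : Int), Dom_get_ring_delta f1 f2 → Spec_get_ring_delta f1 f2 (get_ring_delta f1 f2)

-- ===== LEMMAS AND PROOFS =====

-- set(xs) of a duplicate-free list is the list itself
lemma set_ofList_eq_self {α : Type} [BEq α] [LawfulBEq α] (l : List α) (h : l.Nodup) :
    PySem.Set.ofList l = l := by
  suffices H : ∀ (l s : List α), (s ++ l).Nodup → l.foldl PySem.Set.add s = s ++ l by
    simpa using H l [] (by simpa using h)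
  intro l
  induction l with
  | nil => intro s _; simp
  | cons x t ih =>
    intro s hs
    have hx : PySem.Set.add s x = s ++ [x] := by
      have : x ∉ s := by
        intro hmem; exact (List.disjoint_of_nodup_append hs) hmem (by simp)
      simp [PySem.Set.add, pysem, this]
    have := ih (s ++ [x]) (by simpa using hs)
    simpa [hx] using this

-- A's generated f1-cell list has no duplicates, so it is exactly set(...) in generation order
lemma square_set_exact (a b : Int) :
    PySem.Set.ofList ((PySem.List.pyRange a b 1).flatMap (fun r =>
        (PySem.List.pyRange a b 1).map (fun c => (r, c))))
      = (PySem.List.pyRange a b 1).flatMap (fun r =>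
        (PySem.List.pyRange a b 1).map (fun c => (r, c))) := by
  apply set_ofList_eq_self
  have := List.Nodup.product (PySem.List.nodup_pyRange_one (a := a) (b := b))
    (PySem.List.nodup_pyRange_one (a := a) (b := b))
  simpa [List.product] using this

-- the membership test in A's f1-cell set IS B's bounds inequality (negated)
lemma contains_square (a b r c : Int) :
    PySem.Set.contains
      ((PySem.List.pyRange a b 1).flatMap (fun r =>
        (PySem.List.pyRange a b 1).map (fun c => (r, c)))) (r, c)
    = !(decide (r < a) || decide (b ≤ r) || decide (c < a) || decide (b ≤ c)) := by
  rw [← square_set_exact a b]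
  have hmem : (r, c) ∈ (PySem.List.pyRange a b 1).flatMap (fun r =>
      (PySem.List.pyRange a b 1).map (fun c => (r, c))) ↔
      ((a ≤ r ∧ r < b) ∧ (a ≤ c ∧ c < b)) := by
    simp [List.mem_flatMap, PySem.List.mem_pyRange_one]
  have h1 : PySem.Set.contains
      (PySem.Set.ofList ((PySem.List.pyRange a b 1).flatMap (fun r =>
        (PySem.List.pyRange a b 1).map (fun c => (r, c))))) (r, c)
      = decide ((r, c) ∈ (PySem.List.pyRange a b 1).flatMap (fun r =>
        (PySem.List.pyRange a b 1).map (fun c => (r, c)))) := by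
    simp [pysem]
  rw [h1, decide_eq_decide.mpr (hmem.trans
    (show ((a ≤ r ∧ r < b) ∧ (a ≤ c ∧ c < b)) ↔ ¬(r < a ∨ b ≤ r ∨ c < a ∨ b ≤ c) from by omega))]
  · by_cases h1 : a ≤ r <;> by_cases h2 : r < b <;> by_cases h3 : a ≤ c <;> by_cases h4 : c < b <;>
      first | (simp [h1, h2, h3, h4]; done) | (simp [h1, h2, h3, h4]; omega)
  · infer_instance

-- ===== VERDICT (by name: the statement is the Claim_ definition above) =====
theorem get_ring_delta_spec : Claim_equal_get_ring_delta := by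
  intro f1 f2 _
  show get_ring_delta f1 f2 = get_ring_delta_alt f1 f2
  dsimp only [get_ring_delta, get_ring_delta_alt]
  simp only [contains_square, Bool.not_not]
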